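-- pv_equiv track=rewrite | github.com/chkwon/redpen-app | scripts/openai_review.py | chunk_file_by_lines
-- ===== SOURCE A (Python) =====
-- from typing import Any, Dict, List, Optional
--
-- def chunk_file_by_lines(file_text: str, max_chars: int) -> List[tuple[str, int]]:
--     """Split file into chunks that respect line boundaries.
--
--     Returns list of (chunk_text, start_line_number) tuples.
--     """
--     lines = file_text.split("\n")
--     chunks = []
--     current_chunk_lines = []
--     current_chunk_size = 0
--     chunk_start_line = 1
--
--     for i, line in enumerate(lines):
--         line_with_newline = line + "\n"
--         line_size = len(line_with_newline)
--
--         # If adding this line would exceed max_chars, start a new chunk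
--         if current_chunk_size + line_size > max_chars and current_chunk_lines:
--             chunk_text = "\n".join(current_chunk_lines)
--             chunks.append((chunk_text, chunk_start_line))
--             current_chunk_lines = []
--             current_chunk_size = 0
--             chunk_start_line = i + 1  # 1-based line number
--
--         current_chunk_lines.append(line)
--         current_chunk_size += line_size
--
--     # Don't forget the last chunk
--     if current_chunk_lines:
--         chunk_text = "\n".join(current_chunk_lines)
--         chunks.append((chunk_text, chunk_start_line))
--
--     return chunks
-- ===== SOURCE B (Python) =====
-- def chunk_file_by_lines(file_text: str, max_chars: int):
--     """Split file into chunks that respect line boundaries.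
--
--     Two-phase: first compute chunk-start line indices in one pass,
--     then build the chunks from consecutive boundary pairs.
--     """
--     lines = file_text.split("\n")
--     starts = [0]
--     size = 0
--     for i, line in enumerate(lines):
--         line_size = len(line) + 1
--         if size + line_size > max_chars and i > starts[-1]:
--             starts.append(i)
--             size = line_size
--         else:
--             size += line_size
--     bounds = starts + [len(lines)]
--     return [("\n".join(lines[s:e]), s + 1) for s, e in zip(bounds, bounds[1:])]
-- ===== Notes on version B (the rewrite author's own statement) =====
-- stated objective: alternative
-- what changed: B first computes the list of chunk-start line indices in one boundary-finding pass (no line buffer), then builds the chunks in a separate pass as ('\n'.join(lines[s:e]), s+1) over consecutive boundary pairs, instead of A's single loop accumulating and flushing a current-chunk line buffer.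
import Mathlib
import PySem

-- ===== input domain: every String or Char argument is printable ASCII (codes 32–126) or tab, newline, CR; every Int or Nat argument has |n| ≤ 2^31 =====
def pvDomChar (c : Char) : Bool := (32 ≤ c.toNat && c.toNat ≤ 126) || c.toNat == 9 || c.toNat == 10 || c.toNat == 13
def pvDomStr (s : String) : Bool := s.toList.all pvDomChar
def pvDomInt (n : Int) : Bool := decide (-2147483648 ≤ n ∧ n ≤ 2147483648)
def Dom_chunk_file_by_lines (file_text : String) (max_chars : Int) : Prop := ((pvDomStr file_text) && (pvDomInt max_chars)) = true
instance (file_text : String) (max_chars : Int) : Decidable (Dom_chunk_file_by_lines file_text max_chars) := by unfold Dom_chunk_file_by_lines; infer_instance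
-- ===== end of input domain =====

-- B splits boundary-finding from chunk-building (one pass computing start indices, then a
-- pass over consecutive boundary pairs) instead of A's inline line-buffer accumulation;
-- objective: alternative decomposition, same exact result.

-- ===== PORT A =====
-- file_text.split("\n"): sep is the non-empty literal "\n", so split? is always `some`;
-- the `.getD []` default is never taken (proved in pvSplitNL_ne_nil below).
def pvSplitNL (s : String) : List String := (PySem.Str.split? s "\n").getD []

-- one iteration of A's for-loop; state = (chunks, current_chunk_lines, current_chunk_size, chunk_start_line)
def stepA (max_chars : Int) (st : List (String × Int) × List String × Int × Int)
    (p : Int × String) : List (String × Int) × List String × Int × Int :=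
  let line_size : Int := PySem.Str.len p.2 + 1
  if st.2.2.1 + line_size > max_chars ∧ st.2.1 ≠ [] then
    (st.1 ++ [(PySem.Str.join "\n" st.2.1, st.2.2.2)], [p.2], line_size, p.1 + 1)
  else
    (st.1, st.2.1 ++ [p.2], st.2.2.1 + line_size, st.2.2.2)

def chunk_file_by_lines (file_text : String) (max_chars : Int) : List (String × Int) :=
  let lines := pvSplitNL file_text
  let st := (PySem.List.enumerate lines).foldl (stepA max_chars) ([], [], 0, 1)
  if st.2.1 ≠ [] then st.1 ++ [(PySem.Str.join "\n" st.2.1, st.2.2.2)] else st.1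

-- ===== PORT B =====
-- one iteration of B's boundary pass; state = (starts, size); starts[-1] = getLastD 0 (starts is never empty)
def stepB (max_chars : Int) (st : List Int × Int) (p : Int × String) : List Int × Int :=
  let line_size : Int := PySem.Str.len p.2 + 1
  if st.2 + line_size > max_chars ∧ p.1 > st.1.getLastD 0 then (st.1 ++ [p.1], line_size)
  else (st.1, st.2 + line_size)

-- the comprehension over zip(bounds, bounds[1:])
def pvBuild (lines : List String) (bounds : List Int) : List (String × Int) :=
  (bounds.zip bounds.tail).map (fun q =>
    (PySem.Str.join "\n" (PySem.List.slice lines (some q.1) (some q.2)), q.1 + 1))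

def chunk_file_by_lines_alt (file_text : String) (max_chars : Int) : List (String × Int) :=
  let lines := pvSplitNL file_text
  let st := (PySem.List.enumerate lines).foldl (stepB max_chars) ([0], 0)
  pvBuild lines (st.1 ++ [(lines.length : Int)])

-- ===== PRECONDITION & SPEC =====
def Spec_chunk_file_by_lines (file_text : String) (max_chars : Int) (out : List (String × Int)) : Prop := out = chunk_file_by_lines_alt file_text max_chars
instance (file_text : String) (max_chars : Int) (out : List (String × Int)) : Decidable (Spec_chunk_file_by_lines file_text max_chars out) := by unfold Spec_chunk_file_by_lines; infer_instance

-- ===== CLAIM (what is proved, stated in full; the proofs are below) =====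
def Claim_equal_chunk_file_by_lines : Prop := ∀ (file_text : String) (max_chars : Int), Dom_chunk_file_by_lines file_text max_chars → Spec_chunk_file_by_lines file_text max_chars (chunk_file_by_lines file_text max_chars)

-- ===== LEMMAS AND PROOFS =====

lemma go_ne_nil (sep : List Char) (fuel : Nat) (l cur : List Char) (acc : List (List Char)) :
    PySem.Chars.splitOn.go sep fuel l cur acc ≠ [] := by
  induction fuel generalizing l cur acc with
  | zero => simp [PySem.Chars.splitOn.go]
  | succ n ih =>
    cases l with
    | nil => simp [PySem.Chars.splitOn.go]
    | cons c rest =>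
      rw [PySem.Chars.splitOn.go]
      split
      · exact ih _ _ _
      · exact ih _ _ _

lemma pvSplitNL_ne_nil (s : String) : pvSplitNL s ≠ [] := by
  unfold pvSplitNL PySem.Str.split? PySem.Chars.split? PySem.Chars.splitOn
  simp [go_ne_nil]

lemma zip_tail_append (l : List Int) (x g : Int) (hg : l.getLast? = some g) :
    (l ++ [x]).zip (l ++ [x]).tail = l.zip l.tail ++ [(g, x)] := by
  induction l with
  | nil => simp at hg
  | cons a t ih =>
    cases t with
    | nil => simp_all
    | cons b t' =>
      rw [List.getLast?_cons_cons] at hg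
      have h2 := ih hg
      simp only [List.cons_append, List.zip_cons_cons, List.tail_cons] at *
      rw [h2]

lemma chunk_sim (max_chars : Int) (lines done rest : List String)
    (hne : lines ≠ []) (hl : lines = done ++ rest)
    (starts : List Int) (g : Int) (hg : starts.getLast? = some g)
    (hg0 : 0 ≤ g) (hgle : g.toNat ≤ done.length)
    (hglt : done ≠ [] → g.toNat < done.length)
    (size : Int) :
    (let st := (PySem.List.enumerate rest (done.length : Int)).foldl (stepA max_chars)
        ((starts.zip starts.tail).map (fun q =>
          (PySem.Str.join "\n" (PySem.List.slice lines (some q.1) (some q.2)), q.1 + 1)),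
         done.drop g.toNat, size, g + 1)
     if st.2.1 ≠ [] then st.1 ++ [(PySem.Str.join "\n" st.2.1, st.2.2.2)] else st.1)
    = pvBuild lines
        (((PySem.List.enumerate rest (done.length : Int)).foldl (stepB max_chars) (starts, size)).1
          ++ [(lines.length : Int)]) := by
  induction rest generalizing done starts g size with
  | nil =>
    have hdone : done = lines := by simpa using hl.symm
    subst hdone
    have hlt := hglt hne
    have hcur : done.drop g.toNat ≠ [] := by
      intro h
      have := congrArg List.length h
      simp [List.length_drop] at this
      omega
    simp only [PySem.List.enumerate_nil, List.foldl_nil]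
    rw [if_pos hcur]
    have hsl : PySem.List.slice done (some g) (some (done.length : Int)) = List.drop g.toNat done := by
      rw [PySem.List.slice_toNat _ hg0 (by positivity)]
      exact List.take_of_length_le (by simp [List.length_drop])
    unfold pvBuild
    rw [zip_tail_append _ _ _ hg]
    simp only [List.map_append, List.map_cons, List.map_nil]
    congr 2
    rw [hsl]
  | cons line rest ih =>
    rw [PySem.List.enumerate_cons, List.foldl_cons, List.foldl_cons]
    have hcur_iff : (done.drop g.toNat ≠ []) ↔ ((done.length : Int) > g) := by
      constructor
      · intro h
        have : g.toNat < done.length := by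
          by_contra hc
          exact h (List.drop_eq_nil_of_le (by omega))
        omega
      · intro h hnil
        have := congrArg List.length hnil
        simp [List.length_drop] at this
        omega
    by_cases hcond : size + (PySem.Str.len line + 1) > max_chars ∧ (done.length : Int) > g
    · -- flush: both branches taken
      have hA : (size + (PySem.Str.len line + 1) > max_chars ∧ done.drop g.toNat ≠ []) := by
        exact ⟨hcond.1, hcur_iff.mpr hcond.2⟩
      rw [show stepA max_chars
            ((starts.zip starts.tail).map (fun q =>
              (PySem.Str.join "\n" (PySem.List.slice lines (some q.1) (some q.2)), q.1 + 1)),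
             done.drop g.toNat, size, g + 1) ((done.length : Int), line)
          = ((starts.zip starts.tail).map (fun q =>
              (PySem.Str.join "\n" (PySem.List.slice lines (some q.1) (some q.2)), q.1 + 1))
              ++ [(PySem.Str.join "\n" (done.drop g.toNat), g + 1)],
             [line], PySem.Str.len line + 1, (done.length : Int) + 1)
          from by unfold stepA; rw [if_pos hA]]
      rw [show stepB max_chars (starts, size) ((done.length : Int), line)
          = (starts ++ [(done.length : Int)], PySem.Str.len line + 1)
          from by
            unfold stepB
            rw [if_pos ⟨hcond.1, by rw [List.getLastD_eq_getLast?, hg]; exact hcond.2⟩]]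
      have hjoin : PySem.Str.join "\n" (done.drop g.toNat)
          = PySem.Str.join "\n" (PySem.List.slice lines (some g) (some ((done.length : Nat) : Int))) := by
        congr 1
        rw [PySem.List.slice_toNat _ hg0 (by positivity), hl,
            List.drop_append_of_le_length hgle]
        rw [Int.toNat_natCast]
        rw [List.take_append_of_le_length (by simp [List.length_drop])]
        rw [List.take_of_length_le (by simp [List.length_drop])]
      have hmap : (starts.zip starts.tail).map (fun q =>
              (PySem.Str.join "\n" (PySem.List.slice lines (some q.1) (some q.2)), q.1 + 1))
              ++ [(PySem.Str.join "\n" (done.drop g.toNat), g + 1)]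
          = ((starts ++ [(done.length : Int)]).zip (starts ++ [(done.length : Int)]).tail).map
              (fun q => (PySem.Str.join "\n" (PySem.List.slice lines (some q.1) (some q.2)), q.1 + 1)) := by
        rw [zip_tail_append _ _ _ hg]
        simp [hjoin]
      rw [hmap]
      have := ih (done ++ [line])
        (by simpa using hl) (starts ++ [(done.length : Int)]) ((done.length : Int))
        (by simp) (by positivity)
        (by simp) (by intro _; simp)
        (PySem.Str.len line + 1)
      simp only [List.length_append, List.length_cons, List.length_nil, Nat.cast_add,
        Nat.cast_one, Int.toNat_natCast, List.drop_append_of_le_length (le_refl done.length),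
        List.drop_length, List.nil_append, Nat.zero_add] at this ⊢
      convert this using 3
    · -- no flush: both branches skipped
      have hA : ¬ (size + (PySem.Str.len line + 1) > max_chars ∧ done.drop g.toNat ≠ []) := by
        intro h; exact hcond ⟨h.1, hcur_iff.mp h.2⟩
      rw [show stepA max_chars
            ((starts.zip starts.tail).map (fun q =>
              (PySem.Str.join "\n" (PySem.List.slice lines (some q.1) (some q.2)), q.1 + 1)),
             done.drop g.toNat, size, g + 1) ((done.length : Int), line)
          = ((starts.zip starts.tail).map (fun q =>
              (PySem.Str.join "\n" (PySem.List.slice lines (some q.1) (some q.2)), q.1 + 1)),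
             done.drop g.toNat ++ [line], size + (PySem.Str.len line + 1), g + 1)
          from by unfold stepA; rw [if_neg hA]]
      rw [show stepB max_chars (starts, size) ((done.length : Int), line)
          = (starts, size + (PySem.Str.len line + 1))
          from by
            unfold stepB
            rw [if_neg (by
              intro h
              exact hcond ⟨h.1, by rw [List.getLastD_eq_getLast?, hg] at h; exact h.2⟩)]]
      have := ih (done ++ [line])
        (by simpa using hl) starts g hg hg0
        (by simp; omega) (by intro _; simp; omega)
        (size + (PySem.Str.len line + 1))
      simp only [List.length_append, List.length_cons, List.length_nil, Nat.cast_add,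
        Nat.cast_one, Nat.zero_add,
        List.drop_append_of_le_length hgle] at this ⊢
      convert this using 3

-- ===== VERDICT (by name: the statement is the Claim_ definition above) =====
theorem chunk_file_by_lines_spec : Claim_equal_chunk_file_by_lines := by
  intro file_text max_chars _
  unfold Spec_chunk_file_by_lines chunk_file_by_lines chunk_file_by_lines_alt
  have hne := pvSplitNL_ne_nil file_text
  have h := chunk_sim max_chars (pvSplitNL file_text) [] (pvSplitNL file_text)
    hne (by simp) [0] 0 (by simp) (by simp) (by simp) (by simp) 0
  simpa using h
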